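-- pv_equiv track=rewrite | github.com/DataDog/datadog-agent-boshrelease | jobs/datadog-firehose-nozzle/templates/clean_config.py | clean_secret
-- ===== SOURCE A (Python) =====
-- def clean_secret(secret, retain_last=False, truncate_length=False):
--     i = 0
--     cleaned_secret = ''
--     for c in secret:
--         if i > len(secret) - 6 and retain_last:
--             cleaned_secret += c
--         else:
--             cleaned_secret += '*'
--         if i == 5 and truncate_length:
--             return cleaned_secret
--         i += 1
--     return cleaned_secret
-- ===== SOURCE B (Python) =====
-- def clean_secret(secret, retain_last=False, truncate_length=False):
--     n = len(secret)
--     keep = min(n, 5) if retain_last else 0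
--     result = '*' * (n - keep) + secret[n - keep:]
--     if truncate_length and n >= 6:
--         return result[:6]
--     return result
-- ===== Notes on version B (the rewrite author's own statement) =====
-- stated objective: simpler
-- what changed: Replaced the per-character masking loop with an early return by arithmetic (how many leading chars are masked) plus string repetition and slicing, truncating with a slice at the end.
import Mathlib
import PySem

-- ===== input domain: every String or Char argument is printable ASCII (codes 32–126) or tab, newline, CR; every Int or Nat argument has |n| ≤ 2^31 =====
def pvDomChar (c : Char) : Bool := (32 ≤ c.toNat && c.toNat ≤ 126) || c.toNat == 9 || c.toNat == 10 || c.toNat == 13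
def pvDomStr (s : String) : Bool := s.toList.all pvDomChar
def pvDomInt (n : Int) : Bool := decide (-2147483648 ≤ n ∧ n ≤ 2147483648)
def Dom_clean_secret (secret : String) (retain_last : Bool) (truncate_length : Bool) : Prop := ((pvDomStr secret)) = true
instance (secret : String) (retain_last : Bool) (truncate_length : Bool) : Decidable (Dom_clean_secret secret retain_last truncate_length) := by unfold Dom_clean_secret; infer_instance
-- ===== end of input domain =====

-- B replaces A's per-character loop (with early return) by arithmetic + repetition + slicing; objective: simpler.

-- ===== PORT A =====
-- the for-loop of A, with early return on `i == 5 and truncate_length`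
def cleanLoopA (n : Int) (retain_last truncate_length : Bool) : List Char → Int → List Char → List Char
  | [], _, acc => acc
  | c :: rest, i, acc =>
    let acc' := if n - 6 < i ∧ retain_last = true then acc ++ [c] else acc ++ ['*']
    if i = 5 ∧ truncate_length = true then acc'
    else cleanLoopA n retain_last truncate_length rest (i + 1) acc'

def clean_secret (secret : String) (retain_last : Bool) (truncate_length : Bool) : String :=
  String.mk (cleanLoopA (secret.toList.length : Int) retain_last truncate_length secret.toList 0 [])

-- ===== PORT B =====
def clean_secret_alt (secret : String) (retain_last : Bool) (truncate_length : Bool) : String :=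
  let L := secret.toList
  let n := L.length
  let keep := if retain_last then min n 5 else 0
  let result := List.replicate (n - keep) '*' ++ L.drop (n - keep)
  if truncate_length ∧ 6 ≤ n then String.mk (result.take 6) else String.mk result

-- ===== PRECONDITION & SPEC =====
def Spec_clean_secret (secret : String) (retain_last : Bool) (truncate_length : Bool) (out : String) : Prop := out = clean_secret_alt secret retain_last truncate_length
instance (secret : String) (retain_last : Bool) (truncate_length : Bool) (out : String) : Decidable (Spec_clean_secret secret retain_last truncate_length out) := by unfold Spec_clean_secret; infer_instance

-- ===== CLAIM (what is proved, stated in full; the proofs are below) =====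
def Claim_equal_clean_secret : Prop := ∀ (secret : String) (retain_last : Bool) (truncate_length : Bool), Dom_clean_secret secret retain_last truncate_length → Spec_clean_secret secret retain_last truncate_length (clean_secret secret retain_last truncate_length)

-- ===== LEMMAS AND PROOFS =====

-- the masked list when no early return happens, starting at index i
def maskFrom (n : Int) (r : Bool) : List Char → Int → List Char
  | [], _ => []
  | c :: rest, i => (if n - 6 < i ∧ r = true then c else '*') :: maskFrom n r rest (i + 1)

theorem cleanLoopA_acc (n : Int) (r t : Bool) (xs : List Char) (i : Int) (acc : List Char) :
    cleanLoopA n r t xs i acc = acc ++ cleanLoopA n r t xs i [] := by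
  induction xs generalizing i acc with
  | nil => simp [cleanLoopA]
  | cons c rest ih =>
    simp only [cleanLoopA]
    split_ifs with h1 h2 h2
    · simp
    · simp
    · rw [ih (i + 1) (acc ++ [c]), ih (i + 1) ([] ++ [c])]; simp
    · rw [ih (i + 1) (acc ++ ['*']), ih (i + 1) ([] ++ ['*'])]; simp

theorem cleanLoopA_false (n : Int) (r : Bool) (xs : List Char) (i : Int) :
    cleanLoopA n r false xs i [] = maskFrom n r xs i := by
  induction xs generalizing i with
  | nil => simp [cleanLoopA, maskFrom]
  | cons c rest ih =>
    have hcond : ¬(i = 5 ∧ (false : Bool) = true) := by simp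
    simp only [cleanLoopA]
    rw [if_neg hcond, cleanLoopA_acc, ih]
    simp only [maskFrom]
    split_ifs with h1 <;> simp

theorem cleanLoopA_true (n : Int) (r : Bool) (xs : List Char) (i : Int)
    (h0 : 0 ≤ i) (h5 : i ≤ 5) :
    cleanLoopA n r true xs i [] = maskFrom n r (xs.take (6 - i).toNat) i := by
  induction xs generalizing i with
  | nil => simp [cleanLoopA, maskFrom]
  | cons c rest ih =>
    by_cases h : i = 5
    · subst h
      have h1 : ((6 : Int) - 5).toNat = 1 := by norm_num
      simp only [cleanLoopA]
      rw [if_pos (by simp), h1]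
      simp only [List.take_succ_cons, List.take_zero, maskFrom]
      split_ifs with h2 <;> simp
    · have htk : (6 - i).toNat = (6 - (i + 1)).toNat + 1 := by omega
      simp only [cleanLoopA]
      rw [if_neg (by simp [h]), cleanLoopA_acc, ih (i + 1) (by omega) (by omega), htk,
        List.take_succ_cons]
      simp only [maskFrom]
      split_ifs with h1 <;> simp

theorem maskFrom_length (n : Int) (r : Bool) (xs : List Char) (i : Int) :
    (maskFrom n r xs i).length = xs.length := by
  induction xs generalizing i with
  | nil => simp [maskFrom]
  | cons c rest ih => simp [maskFrom, ih]

theorem maskFrom_getElem (n : Int) (r : Bool) (xs : List Char) (i : Int) (j : ℕ)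
    (hj : j < xs.length) :
    (maskFrom n r xs i)[j]'(by rw [maskFrom_length]; exact hj) =
      if n - 6 < i + (j : Int) ∧ r = true then xs[j] else '*' := by
  induction xs generalizing i j with
  | nil => simp at hj
  | cons c rest ih =>
    cases j with
    | zero => simp [maskFrom]
    | succ k =>
      simp only [maskFrom, List.getElem_cons_succ]
      rw [ih (i + 1) k (by simpa using hj)]
      have : i + 1 + (k : Int) = i + ((k : Int) + 1) := by ring
      simp [this]

theorem maskFrom_take (n : Int) (r : Bool) (xs : List Char) (i : Int) (k : ℕ) :
    maskFrom n r (xs.take k) i = (maskFrom n r xs i).take k := by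
  induction xs generalizing i k with
  | nil => simp [maskFrom]
  | cons c rest ih =>
    cases k with
    | zero => simp [maskFrom]
    | succ m => simp [maskFrom, ih]

theorem maskFrom_closed (r : Bool) (L : List Char) (keep : ℕ)
    (hk : keep = if r then min L.length 5 else 0) :
    maskFrom (L.length : Int) r L 0 =
      List.replicate (L.length - keep) '*' ++ L.drop (L.length - keep) := by
  have hkeep : keep ≤ L.length := by rcases r <;> simp [hk]
  apply List.ext_getElem
  · simp only [maskFrom_length, List.length_append, List.length_replicate, List.length_drop]
    omega
  · intro j h1 h2
    have hjn : j < L.length := by simpa [maskFrom_length] using h1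
    rw [maskFrom_getElem _ _ _ _ j hjn]
    rcases Nat.lt_or_ge j (L.length - keep) with hc | hc
    · rw [List.getElem_append_left (by simpa using hc), List.getElem_replicate]
      rw [if_neg]
      rcases r with _ | _
      · simp
      · simp only [if_pos] at hk
        rintro ⟨hcon, -⟩
        omega
    · rw [List.getElem_append_right (by simpa using hc)]
      simp only [List.length_replicate, List.getElem_drop]
      rcases r with _ | _
      · simp only [if_neg (Bool.false_ne_true)] at hk
        subst hk
        exact absurd hjn (by omega)
      · simp only [if_pos] at hk
        have hidx : L.length - keep + (j - (L.length - keep)) = j := by omega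
        rw [if_pos ⟨by omega, rfl⟩]
        exact (getElem_congr_idx hidx).symm

-- ===== VERDICT (by name: the statement is the Claim_ definition above) =====
theorem clean_secret_spec : Claim_equal_clean_secret := by
  intro secret r t _
  unfold Spec_clean_secret
  simp only [clean_secret, clean_secret_alt]
  rcases t with _ | _
  · rw [cleanLoopA_false,
      maskFrom_closed r secret.toList (if r then min secret.toList.length 5 else 0) rfl]
    rw [if_neg (show ¬(false = true ∧ 6 ≤ secret.toList.length) by simp)]
  · rw [cleanLoopA_true _ _ _ _ (by omega) (by omega)]
    have h6 : ((6 : Int) - 0).toNat = 6 := by decide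
    rw [h6, maskFrom_take,
      maskFrom_closed r secret.toList (if r then min secret.toList.length 5 else 0) rfl]
    by_cases hlen : 6 ≤ secret.toList.length
    · rw [if_pos (show (true = true ∧ 6 ≤ secret.toList.length) from ⟨rfl, hlen⟩)]
    · rw [if_neg (show ¬(true = true ∧ 6 ≤ secret.toList.length) from fun h => hlen h.2)]
      congr 1
      apply List.take_of_length_le
      simp only [List.length_append, List.length_replicate, List.length_drop]
      have hstr : secret.toList.length = secret.length := by simp
      rcases r with _ | _ <;> simp <;> omega
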